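-- pv_equiv track=rewrite | github.com/Amirkhaksar/Hackerearth | Breaking walls/Breaking walls.py | getzones
-- ===== SOURCE A (Python) =====
-- def BFS(grid, N, M, line, column, zones, index):
--     stars = 0
--     queue = [(line, column)]
--     while queue:
--         line, column = queue.pop()
--         if zones[line][column] == None:
--             zones[line][column] = index
--             if grid[line][column] == '*':
--                 stars += 1
--             for dline, dcolumn in [(-1, 0), (1, 0), (0, -1), (0, 1)]:
--                 if 0 <= line + dline < N and 0 <= column + dcolumn < M:
--                     if grid[line + dline][column + dcolumn] != '#' and zones[line + dline][column + dcolumn] == None: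
--                         queue.append((line + dline, column + dcolumn))
--     return zones, stars
--
-- def getzones(grid, N, M):
--     zones = [[None] * M for line in range(N)]
--     stars = []
--     for line in range(N):
--         for column in range(M):
--             if grid[line][column] != '#' and zones[line][column] == None:
--                 zones, count = BFS(grid, N, M, line, column, zones, len(stars))
--                 stars.append(count)
--     return zones, stars
-- ===== SOURCE B (Python) =====
-- def getzones(grid, N, M):
--     # Label propagation: per component, mark the seed and then repeatedly sweep the
--     # whole grid row-major, absorbing any unlabeled non-'#' cell adjacent to a cell
--     # already carrying the current label, until a sweep changes nothing.
--     zones = [[None] * M for _ in range(N)]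
--     stars = []
--     for sl in range(N):
--         for sc in range(M):
--             if grid[sl][sc] != '#' and zones[sl][sc] is None:
--                 index = len(stars)
--                 zones[sl][sc] = index
--                 count = 1 if grid[sl][sc] == '*' else 0
--                 changed = True
--                 while changed:
--                     changed = False
--                     for l in range(N):
--                         for c in range(M):
--                             if zones[l][c] is None and grid[l][c] != '#':
--                                 if ((l > 0 and zones[l - 1][c] == index) or
--                                         (l + 1 < N and zones[l + 1][c] == index) or
--                                         (c > 0 and zones[l][c - 1] == index) or
--                                         (c + 1 < M and zones[l][c + 1] == index)):
--                                     zones[l][c] = index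
--                                     if grid[l][c] == '*':
--                                         count += 1
--                                     changed = True
--                 stars.append(count)
--     return zones, stars
-- ===== Notes on version B (the rewrite author's own statement) =====
-- stated objective: alternative
-- what changed: Replaces A's per-component BFS worklist (a helper with an explicit queue of cells) by queue-free label propagation: the seed is marked, then whole-grid row-major sweeps absorb any unlabeled non-'#' cell adjacent to an already-labeled cell, repeated until a sweep changes nothing.
import Mathlib
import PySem

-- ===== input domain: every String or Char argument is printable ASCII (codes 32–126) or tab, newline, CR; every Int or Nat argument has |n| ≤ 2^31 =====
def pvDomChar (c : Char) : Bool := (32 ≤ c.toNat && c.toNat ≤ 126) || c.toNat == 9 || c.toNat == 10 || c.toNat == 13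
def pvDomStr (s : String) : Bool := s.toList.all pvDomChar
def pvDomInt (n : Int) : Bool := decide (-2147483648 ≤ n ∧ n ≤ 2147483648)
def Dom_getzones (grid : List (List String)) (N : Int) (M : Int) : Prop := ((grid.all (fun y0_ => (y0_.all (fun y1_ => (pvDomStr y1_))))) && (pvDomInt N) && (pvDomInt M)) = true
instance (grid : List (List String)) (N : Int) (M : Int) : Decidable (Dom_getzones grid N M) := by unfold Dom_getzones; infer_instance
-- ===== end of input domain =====

-- B replaces A's per-component BFS worklist by queue-free label propagation (whole-grid
-- row-major sweeps repeated until a sweep changes nothing); objective: alternative algorithm.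

-- ----- shared low-level helpers (Python indexing / assignment on the 2D grids) -----

/-- `grid[l][c]` as a String; the default `""` is reached only where Python would raise
    IndexError (outside `Pre_getzones`). -/
def pvCellS (grid : List (List String)) (l c : Int) : String :=
  PySem.List.pyGetD (PySem.List.pyGetD grid l []) c ""

/-- `zones[l][c]` : `none` = IndexError (unreachable under `Pre_getzones`), `some w` = the value. -/
def pvGet2? (zs : List (List (Option Int))) (l c : Int) : Option (Option Int) :=
  (PySem.List.pyGet? zs l).bind (fun row => PySem.List.pyGet? row c)

/-- `zones[l][c] = v` (fetch the row, set the element); out of range = IndexError in Python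
    (unreachable under `Pre_getzones`), the port leaves `zs` unchanged there. -/
def pvSet2 (zs : List (List (Option Int))) (l c : Int) (v : Option Int) : List (List (Option Int)) :=
  match PySem.List.pyGet? zs l with
  | none => zs
  | some row => PySem.List.pySetD zs l (PySem.List.pySetD row c v)

/-- `0 <= l < N and 0 <= c < M` -/
def pvInb (N M l c : Int) : Bool :=
  decide (0 ≤ l) && decide (l < N) && decide (0 ≤ c) && decide (c < M)

/-- number of `None` cells of `zones` (termination measure only). -/
def pvNoneCount (zs : List (List (Option Int))) : Nat :=
  (zs.map (fun r => r.countP (fun x => x == none))).sum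

/-- A's neighbour-offset list `[(-1, 0), (1, 0), (0, -1), (0, 1)]`. -/
def pvDirs4 : List (Int × Int) := [(-1, 0), (1, 0), (0, -1), (0, 1)]

-- termination helper lemmas (cited by the ports' `decreasing_by`)

theorem pvSetD_resolve {α : Type} (xs : List α) (i : Int) (x v : α)
    (h : PySem.List.pyGet? xs i = some x) :
    ∃ j, ∃ _ : j < xs.length, xs[j] = x ∧ PySem.List.pySetD xs i v = xs.set j v := by
  simp only [PySem.List.pyGet?, PySem.List.pySetD, PySem.List.pySet?, PySem.List.pyIdx?] at h ⊢
  split_ifs at h ⊢ with h1 h2 h3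
  · simp only [Option.bind_some] at h
    rcases List.getElem?_eq_some_iff.mp h with ⟨hl, hx⟩
    exact ⟨i.toNat, hl, hx, rfl⟩
  · simp at h
  · simp only [Option.bind_some] at h
    rcases List.getElem?_eq_some_iff.mp h with ⟨hl, hx⟩
    exact ⟨xs.length - (-i).toNat, hl, hx, rfl⟩
  · simp at h

theorem pvCountP_set (row : List (Option Int)) (j : Nat) (hj : j < row.length)
    (hx : row[j] = none) (v : Int) :
    (row.set j (some v)).countP (fun x => x == none) + 1 = row.countP (fun x => x == none) := by
  have h1 : row.set j (some v) = row.take j ++ some v :: row.drop (j+1) := by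
    rw [List.set_eq_take_append_cons_drop, if_pos hj]
  have h2 : row.take j ++ row[j] :: row.drop (j+1) = row := by
    rw [List.getElem_cons_drop hj, List.take_append_drop]
  conv_rhs => rw [← h2]
  rw [h1]
  simp [List.countP_append, hx]
  omega

theorem pvNoneCount_setRow (zs : List (List (Option Int))) (j : Nat) (hj : j < zs.length)
    (r' : List (Option Int)) :
    pvNoneCount (zs.set j r') + zs[j].countP (fun x => x == none)
      = pvNoneCount zs + r'.countP (fun x => x == none) := by
  have h1 : zs.set j r' = zs.take j ++ r' :: zs.drop (j+1) := by
    rw [List.set_eq_take_append_cons_drop, if_pos hj]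
  have h2 : zs.take j ++ zs[j] :: zs.drop (j+1) = zs := by
    rw [List.getElem_cons_drop hj, List.take_append_drop]
  have e1 := congrArg List.sum (List.take_append_drop j (zs.map (fun r => r.countP (fun x => x == none))))
  rw [List.sum_append] at e1
  have e2 : List.drop j (zs.map (fun r => r.countP (fun x => x == none)))
      = zs[j].countP (fun x => x == none) :: List.drop (j+1) (zs.map (fun r => r.countP (fun x => x == none))) := by
    rw [← List.getElem_cons_drop (by simpa using hj)]
    simp
  rw [e2, List.sum_cons] at e1
  unfold pvNoneCount
  rw [h1]
  simp only [List.map_append, List.sum_append, List.map_cons, List.sum_cons, List.map_take, List.map_drop]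
  omega

theorem pvNoneCount_set2 (zs : List (List (Option Int))) (l c : Int) (v : Int)
    (h : pvGet2? zs l c = some none) :
    pvNoneCount (pvSet2 zs l c (some v)) + 1 = pvNoneCount zs := by
  unfold pvGet2? at h
  cases hrow : PySem.List.pyGet? zs l with
  | none => rw [hrow] at h; simp at h
  | some row =>
    rw [hrow] at h; simp only [Option.bind_some] at h
    obtain ⟨j, hj, hjx, hset⟩ := pvSetD_resolve zs l row (PySem.List.pySetD row c (some v)) hrow
    obtain ⟨j', hj', hjx', hset'⟩ := pvSetD_resolve row c none (some v) h
    unfold pvSet2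
    rw [hrow]
    dsimp only
    rw [hset, hset']
    have hc := pvCountP_set row j' hj' hjx' v
    have hn := pvNoneCount_setRow zs j hj (PySem.List.pySetD row c (some v))
    rw [hjx] at hn
    rw [hset'] at hn
    omega

theorem pvNoneCount_set2_lt (zs : List (List (Option Int))) (l c : Int) (v : Int)
    (h : pvGet2? zs l c = some none) :
    pvNoneCount (pvSet2 zs l c (some v)) < pvNoneCount zs := by
  have := pvNoneCount_set2 zs l c v h; omega

-- ===== PORT A =====

/-- the pushes of one BFS step: `for (dline,dcolumn) in [(-1,0),(1,0),(0,-1),(0,1)]: if … append`. -/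
def pvBFSPush (grid : List (List String)) (N M : Int) (zs : List (List (Option Int)))
    (l c : Int) : List (Int × Int) :=
  ((pvDirs4).map (fun d => (l + d.1, c + d.2))).filter
    (fun p => pvInb N M p.1 p.2 && (pvCellS grid p.1 p.2 != "#")
              && (pvGet2? zs p.1 p.2 == some none))

theorem pvBFSPush_len_le (grid : List (List String)) (N M : Int)
    (zs : List (List (Option Int))) (l c : Int) : (pvBFSPush grid N M zs l c).length ≤ 4 := by
  have h := List.length_filter_le
    (fun p => pvInb N M p.1 p.2 && (pvCellS grid p.1 p.2 != "#")
              && (pvGet2? zs p.1 p.2 == some none))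
    ((pvDirs4).map (fun d => (l + d.1, c + d.2)))
  simpa [pvDirs4, pvBFSPush] using h

/-- the `while queue:` loop of A's `BFS` helper. The queue is stored top-first
    (Python appends and pops at the END; the port conses and pops at the HEAD).
    Python raises IndexError on a structurally out-of-range cell (only outside
    `Pre_getzones`); there `pvGet2? = none ≠ some none` and the port skips. -/
def pvBFSLoop (grid : List (List String)) (N M index : Int)
    (zs : List (List (Option Int))) (stars : Int) (queue : List (Int × Int)) :
    List (List (Option Int)) × Int :=
  match queue with
  | [] => (zs, stars)
  | (l, c) :: rest =>
    if h : pvGet2? zs l c = some none then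
      let zs' := pvSet2 zs l c (some index)
      let stars' := stars + (if pvCellS grid l c = "*" then 1 else 0)
      pvBFSLoop grid N M index zs' stars' ((pvBFSPush grid N M zs' l c).reverse ++ rest)
    else
      pvBFSLoop grid N M index zs stars rest
termination_by 5 * pvNoneCount zs + queue.length
decreasing_by
  · have h1 := pvNoneCount_set2_lt zs l c index h
    have h2 := pvBFSPush_len_le grid N M (pvSet2 zs l c (some index)) l c
    simp only [List.length_append, List.length_reverse, List.length_cons]
    omega
  · simp only [List.length_cons]; omega

def getzones (grid : List (List String)) (N : Int) (M : Int) :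
    List (List (Option Int)) × List Int :=
  let init : List (List (Option Int)) := List.replicate N.toNat (List.replicate M.toNat none)
  (PySem.List.pyRange 0 N 1).foldl (fun acc l =>
    (PySem.List.pyRange 0 M 1).foldl (fun acc c =>
      if pvCellS grid l c ≠ "#" ∧ pvGet2? acc.1 l c = some none then
        let r := pvBFSLoop grid N M (acc.2.length : Int) acc.1 0 [(l, c)]
        (r.1, acc.2 ++ [r.2])
      else acc) acc) (init, ([] : List Int))

-- ===== PORT B =====

/-- B's neighbour test: some already-`index`-labelled cell sits directly above, below,
    left or right (with Python's short-circuit bound guards). -/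
def pvNbrI (zs : List (List (Option Int))) (N M i l c : Int) : Bool :=
  (decide (0 < l) && (pvGet2? zs (l-1) c == some (some i))) ||
  (decide (l+1 < N) && (pvGet2? zs (l+1) c == some (some i))) ||
  (decide (0 < c) && (pvGet2? zs l (c-1) == some (some i))) ||
  (decide (c+1 < M) && (pvGet2? zs l (c+1) == some (some i)))

/-- one cell of a propagation sweep (state: zones, star count, changed flag). -/
def pvStep (grid : List (List String)) (N M i : Int)
    (st : List (List (Option Int)) × Int × Bool) (l c : Int) :
    List (List (Option Int)) × Int × Bool :=
  if pvGet2? st.1 l c = some none ∧ pvCellS grid l c ≠ "#" ∧ pvNbrI st.1 N M i l c = true then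
    (pvSet2 st.1 l c (some i), st.2.1 + (if pvCellS grid l c = "*" then 1 else 0), true)
  else st

/-- one full row-major sweep (`for l in range(N): for c in range(M): …`). -/
def pvSweep (grid : List (List String)) (N M i : Int)
    (st : List (List (Option Int)) × Int × Bool) :
    List (List (Option Int)) × Int × Bool :=
  (PySem.List.pyRange 0 N 1).foldl (fun st l =>
    (PySem.List.pyRange 0 M 1).foldl (fun st c => pvStep grid N M i st l c) st) st

/-- step relation used for the sweep loop's termination: a sweep either marks
    something (strictly fewer `None` cells, flag set) or leaves the state alone. -/
def pvSweepR (st st' : List (List (Option Int)) × Int × Bool) : Prop :=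
  (pvNoneCount st'.1 < pvNoneCount st.1 ∧ st'.2.2 = true) ∨ st' = st

theorem pvFoldR {α St : Type} (R : St → St → Prop) (hrefl : ∀ s, R s s)
    (htrans : ∀ a b c, R a b → R b c → R a c) (f : St → α → St)
    (h : ∀ st a, R st (f st a)) : ∀ (L : List α) (st : St), R st (L.foldl f st) := by
  intro L
  induction L with
  | nil => intro st; exact hrefl st
  | cons a L ih => intro st; exact htrans _ _ _ (h st a) (ih (f st a))

theorem pvSweepR_refl (s : List (List (Option Int)) × Int × Bool) : pvSweepR s s := Or.inr rfl

theorem pvSweepR_trans (a b c : List (List (Option Int)) × Int × Bool)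
    (h1 : pvSweepR a b) (h2 : pvSweepR b c) : pvSweepR a c := by
  rcases h1 with h1 | rfl
  · rcases h2 with h2 | rfl
    · exact Or.inl ⟨by omega, h2.2⟩
    · exact Or.inl h1
  · exact h2

theorem pvStep_R (grid : List (List String)) (N M i : Int)
    (st : List (List (Option Int)) × Int × Bool) (l c : Int) :
    pvSweepR st (pvStep grid N M i st l c) := by
  unfold pvStep
  split
  · rename_i hcond
    exact Or.inl ⟨pvNoneCount_set2_lt st.1 l c i hcond.1, rfl⟩
  · exact Or.inr rfl

theorem pvSweep_R (grid : List (List String)) (N M i : Int)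
    (st : List (List (Option Int)) × Int × Bool) :
    pvSweepR st (pvSweep grid N M i st) := by
  unfold pvSweep
  refine pvFoldR pvSweepR pvSweepR_refl pvSweepR_trans _ ?_ _ st
  intro st' l
  refine pvFoldR pvSweepR pvSweepR_refl pvSweepR_trans _ ?_ _ st'
  intro st'' c
  exact pvStep_R grid N M i st'' l c

theorem pvSweep_changed_lt (grid : List (List String)) (N M i : Int)
    (zs : List (List (Option Int))) (cnt : Int)
    (h : (pvSweep grid N M i (zs, cnt, false)).2.2 = true) :
    pvNoneCount (pvSweep grid N M i (zs, cnt, false)).1 < pvNoneCount zs := by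
  rcases pvSweep_R grid N M i (zs, cnt, false) with h1 | h1
  · exact h1.1
  · rw [h1] at h; simp at h

/-- the `while changed:` loop of B (changed is re-established by each sweep that marks). -/
def pvSweepLoop (grid : List (List String)) (N M i : Int)
    (zs : List (List (Option Int))) (cnt : Int) : List (List (Option Int)) × Int :=
  let st := pvSweep grid N M i (zs, cnt, false)
  if h : st.2.2 = true then pvSweepLoop grid N M i st.1 st.2.1 else (st.1, st.2.1)
termination_by pvNoneCount zs
decreasing_by exact pvSweep_changed_lt grid N M i zs cnt h

def getzones_alt (grid : List (List String)) (N : Int) (M : Int) :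
    List (List (Option Int)) × List Int :=
  let init : List (List (Option Int)) := List.replicate N.toNat (List.replicate M.toNat none)
  (PySem.List.pyRange 0 N 1).foldl (fun acc sl =>
    (PySem.List.pyRange 0 M 1).foldl (fun acc sc =>
      if pvCellS grid sl sc ≠ "#" ∧ pvGet2? acc.1 sl sc = some none then
        let index : Int := (acc.2.length : Int)
        let zs1 := pvSet2 acc.1 sl sc (some index)
        let cnt1 : Int := if pvCellS grid sl sc = "*" then 1 else 0
        let r := pvSweepLoop grid N M index zs1 cnt1
        (r.1, acc.2 ++ [r.2])
      else acc) acc) (init, ([] : List Int))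

-- ===== PRECONDITION & SPEC =====

/-- Exactly the inputs on which A returns normally: when both loops run (`0 < N ∧ 0 < M`),
    every accessed cell `grid[line][column]`, `line < N`, `column < M`, must exist
    (otherwise Python raises IndexError). -/
def Pre_getzones (grid : List (List String)) (N : Int) (M : Int) : Prop :=
  (0 < N ∧ 0 < M) →
    ((N ≤ (grid.length : Int)) ∧ ∀ row ∈ grid.take N.toNat, M ≤ (row.length : Int))
instance (grid : List (List String)) (N : Int) (M : Int) : Decidable (Pre_getzones grid N M) := by
  unfold Pre_getzones; infer_instance

def pvWitness_getzones : List (List String) × Int × Int := ([["*", "#"], [".", "*"]], 2, 2)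

def Spec_getzones (grid : List (List String)) (N : Int) (M : Int) (out : List (List (Option Int)) × List Int) : Prop := out = getzones_alt grid N M
instance (grid : List (List String)) (N : Int) (M : Int) (out : List (List (Option Int)) × List Int) : Decidable (Spec_getzones grid N M out) := by unfold Spec_getzones; infer_instance

-- ===== CLAIM (what is proved, stated in full; the proofs are below) =====
def Claim_equal_getzones : Prop := ∀ (grid : List (List String)) (N : Int) (M : Int), Dom_getzones grid N M → Pre_getzones grid N M → Spec_getzones grid N M (getzones grid N M)

-- ===== LEMMAS AND PROOFS =====

-- ----- proof-layer notions: shapes, openness, adjacency, reachability, invariants -----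

/-- both dimensions of the zones matrix. -/
def pvShape (zs : List (List (Option Int))) (N M : Int) : Prop :=
  zs.length = N.toNat ∧ ∀ r ∈ zs, r.length = M.toNat

/-- an in-bounds, non-wall, still-unlabelled cell (w.r.t. a given zones matrix). -/
def pvOpen (grid : List (List String)) (N M : Int) (zs : List (List (Option Int)))
    (p : Int × Int) : Prop :=
  pvInb N M p.1 p.2 = true ∧ pvCellS grid p.1 p.2 ≠ "#" ∧ pvGet2? zs p.1 p.2 = some none

/-- 4-neighbourhood. -/
def pvAdj (p q : Int × Int) : Prop := ∃ d ∈ pvDirs4, q = (p.1 + d.1, p.2 + d.2)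

/-- reachability from the seed through open cells (w.r.t. the matrix at fill start). -/
inductive pvReach (grid : List (List String)) (N M : Int) (zs : List (List (Option Int)))
    (s : Int × Int) : Int × Int → Prop
  | base : pvOpen grid N M zs s → pvReach grid N M zs s s
  | step (p q : Int × Int) : pvReach grid N M zs s p → pvAdj p q → pvOpen grid N M zs q →
      pvReach grid N M zs s q

/-- every labelled cell has all its open neighbours labelled (outer-loop invariant). -/
def pvClosed (grid : List (List String)) (N M : Int) (zs : List (List (Option Int))) : Prop :=
  ∀ p q : Int × Int, pvInb N M p.1 p.2 = true →
    (∃ v : Int, pvGet2? zs p.1 p.2 = some (some v)) → pvAdj p q → ¬ pvOpen grid N M zs q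

/-- all labels present in the matrix lie in `[0, n)`. -/
def pvBnd (zs : List (List (Option Int))) (n : Int) : Prop :=
  ∀ l c : Int, 0 ≤ l → 0 ≤ c → ∀ v : Int, pvGet2? zs l c = some (some v) → 0 ≤ v ∧ v < n

-- ----- the core read-after-write lemma and shape preservation -----

theorem pvGet2_set2 (zs : List (List (Option Int))) (l c : Int) (v : Option Int)
    (h : pvGet2? zs l c = some none) (hl : 0 ≤ l) (hc : 0 ≤ c)
    (l' c' : Int) (hl' : 0 ≤ l') (hc' : 0 ≤ c') :
    pvGet2? (pvSet2 zs l c v) l' c'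
      = if l' = l ∧ c' = c then some v else pvGet2? zs l' c' := by
  unfold pvGet2? at h
  cases hrow : PySem.List.pyGet? zs l with
  | none => rw [hrow] at h; simp at h
  | some row =>
  rw [hrow] at h; simp only [Option.bind_some] at h
  have hrow' : zs[l.toNat]? = some row := by rw [← PySem.List.pyGet?_of_nonneg _ hl]; exact hrow
  have hcell : row[c.toNat]? = some none := by rw [← PySem.List.pyGet?_of_nonneg _ hc]; exact h
  have hllen : l.toNat < zs.length := (List.getElem?_eq_some_iff.mp hrow').1
  have hclen : c.toNat < row.length := (List.getElem?_eq_some_iff.mp hcell).1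
  have hset : pvSet2 zs l c v = zs.set l.toNat (row.set c.toNat v) := by
    unfold pvSet2; rw [hrow]; dsimp only
    rw [PySem.List.pySetD_of_nonneg _ _ hc, PySem.List.pySetD_of_nonneg _ _ hl]
  rw [hset]
  unfold pvGet2?
  rw [PySem.List.pyGet?_of_nonneg _ hl', PySem.List.pyGet?_of_nonneg _ hl']
  rw [List.getElem?_set]
  by_cases hll : l' = l
  · subst hll
    rw [if_pos rfl, if_pos hllen, hrow']
    simp only [Option.bind_some]
    rw [PySem.List.pyGet?_of_nonneg _ hc', PySem.List.pyGet?_of_nonneg _ hc']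
    rw [List.getElem?_set]
    by_cases hcc : c' = c
    · subst hcc
      rw [if_pos rfl, if_pos hclen]
      simp
    · have : ¬ c.toNat = c'.toNat := by omega
      rw [if_neg this]
      simp [hcc]
  · have : ¬ l.toNat = l'.toNat := by omega
    rw [if_neg this]
    simp [hll]

theorem pvShape_set2 (N M : Int) (zs : List (List (Option Int))) (l c : Int) (v : Option Int)
    (h : pvShape zs N M) : pvShape (pvSet2 zs l c v) N M := by
  unfold pvSet2
  cases hrow : PySem.List.pyGet? zs l with
  | none => simp only [hrow]; exact h
  | some row =>
  simp only [hrow]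
  obtain ⟨j, hj, hjx, hset⟩ := pvSetD_resolve zs l row (PySem.List.pySetD row c v) hrow
  rw [hset]
  refine ⟨by simpa using h.1, ?_⟩
  intro r hr
  rcases List.mem_or_eq_of_mem_set hr with hr | rfl
  · exact h.2 r hr
  · rw [PySem.List.length_pySetD]
    exact h.2 row (PySem.List.mem_of_pyGet?_eq_some _ hrow)

-- ----- star bookkeeping: how many cells currently carry label `i` and a `'*'` -----

def pvStarRow (grid : List (List String)) (i l : Int) (row : List (Option Int)) (c : Int) : Nat :=
  match row with
  | [] => 0
  | z :: rest =>
    (if z = some i ∧ pvCellS grid l c = "*" then 1 else 0) + pvStarRow grid i l rest (c + 1)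

def pvStarI (grid : List (List String)) (i : Int) (zs : List (List (Option Int))) (l : Int) : Nat :=
  match zs with
  | [] => 0
  | row :: rest => pvStarRow grid i l row 0 + pvStarI grid i rest (l + 1)

theorem pvStarRow_set (grid : List (List String)) (i l : Int) :
    ∀ (row : List (Option Int)) (j : Nat) (c0 : Int), row[j]? = some none →
      pvStarRow grid i l (row.set j (some i)) c0
        = pvStarRow grid i l row c0 + (if pvCellS grid l (c0 + j) = "*" then 1 else 0) := by
  intro row
  induction row with
  | nil => intro j c0 hz; simp at hz
  | cons z rest ih =>
    intro j c0 hz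
    cases j with
    | zero =>
      simp only [List.getElem?_cons_zero, Option.some.injEq] at hz
      subst hz
      simp only [List.set_cons_zero, pvStarRow]
      have e : (c0 + ((0 : Nat) : Int)) = c0 := by push_cast; ring
      rw [e]
      by_cases hstar : pvCellS grid l c0 = "*" <;> simp [hstar] <;> omega
    | succ j =>
      simp only [List.getElem?_cons_succ] at hz
      simp only [List.set_cons_succ, pvStarRow]
      rw [ih j (c0 + 1) hz]
      have : c0 + 1 + (j : Int) = c0 + ((j + 1 : Nat) : Int) := by push_cast; ring
      rw [this]
      omega

theorem pvStarI_set (grid : List (List String)) (i : Int) :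
    ∀ (zs : List (List (Option Int))) (j : Nat) (l0 : Int) (r' row : List (Option Int)),
      zs[j]? = some row →
      (pvStarI grid i (zs.set j r') l0 : Int)
        = (pvStarI grid i zs l0 : Int)
          + ((pvStarRow grid i (l0 + j) r' 0 : Int)
             - (pvStarRow grid i (l0 + j) row 0 : Int)) := by
  intro zs
  induction zs with
  | nil => intro j l0 r' row hj; simp at hj
  | cons row0 rest ih =>
    intro j l0 r' row hj
    cases j with
    | zero =>
      simp only [List.getElem?_cons_zero, Option.some.injEq] at hj
      subst hj
      simp only [List.set_cons_zero, pvStarI]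
      have : l0 + ((0 : Nat) : Int) = l0 := by push_cast; ring
      rw [this]
      push_cast
      ring
    | succ j =>
      simp only [List.getElem?_cons_succ] at hj
      simp only [List.set_cons_succ, pvStarI]
      push_cast
      rw [ih j (l0 + 1) r' row hj]
      have : l0 + 1 + (j : Int) = l0 + ((j + 1 : Nat) : Int) := by push_cast; ring
      rw [this]
      push_cast
      ring

theorem pvStarI_set2 (grid : List (List String)) (i : Int) (zs : List (List (Option Int)))
    (l c : Int) (h : pvGet2? zs l c = some none) (hl : 0 ≤ l) (hc : 0 ≤ c) :
    (pvStarI grid i (pvSet2 zs l c (some i)) 0 : Int)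
      = (pvStarI grid i zs 0 : Int) + (if pvCellS grid l c = "*" then 1 else 0) := by
  unfold pvGet2? at h
  cases hrow : PySem.List.pyGet? zs l with
  | none => rw [hrow] at h; simp at h
  | some row =>
  rw [hrow] at h; simp only [Option.bind_some] at h
  have hrow' : zs[l.toNat]? = some row := by rw [← PySem.List.pyGet?_of_nonneg _ hl]; exact hrow
  have hcell : row[c.toNat]? = some none := by rw [← PySem.List.pyGet?_of_nonneg _ hc]; exact h
  have hllen : l.toNat < zs.length := (List.getElem?_eq_some_iff.mp hrow').1
  have hclen : c.toNat < row.length := (List.getElem?_eq_some_iff.mp hcell).1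
  have hset : pvSet2 zs l c (some i) = zs.set l.toNat (row.set c.toNat (some i)) := by
    unfold pvSet2; rw [hrow]; dsimp only
    rw [PySem.List.pySetD_of_nonneg _ _ hc, PySem.List.pySetD_of_nonneg _ _ hl]
  rw [hset, pvStarI_set grid i zs l.toNat 0 _ row hrow']
  have hrs := pvStarRow_set grid i (0 + (l.toNat : Int)) row c.toNat 0 hcell
  rw [hrs]
  have e1 : (0 : Int) + (l.toNat : Int) = l := by omega
  have e2 : (0 : Int) + (c.toNat : Int) = c := by omega
  rw [e1, e2]
  push_cast
  ring

-- ----- matrix extensionality -----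

theorem pvMatrixExt (N M : Int) (zs zs' : List (List (Option Int)))
    (h1 : pvShape zs N M) (h2 : pvShape zs' N M)
    (h : ∀ l c : Int, 0 ≤ l → 0 ≤ c → pvGet2? zs l c = pvGet2? zs' l c) : zs = zs' := by
  apply List.ext_getElem (by rw [h1.1, h2.1])
  intro j hj hj'
  apply List.ext_getElem
    (by rw [h1.2 _ (List.getElem_mem hj), h2.2 _ (List.getElem_mem hj')])
  intro k hk hk'
  have hh := h j k (by positivity) (by positivity)
  unfold pvGet2? at hh
  rw [PySem.List.pyGet?_natCast, PySem.List.pyGet?_natCast] at hh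
  rw [List.getElem?_eq_getElem hj, List.getElem?_eq_getElem hj'] at hh
  simp only [Option.bind_some] at hh
  rw [PySem.List.pyGet?_natCast, PySem.List.pyGet?_natCast] at hh
  rw [List.getElem?_eq_getElem hk, List.getElem?_eq_getElem hk'] at hh
  exact Option.some_injective _ hh

-- ----- unfolding equations for A's loop -----

theorem pvBFS_nil (grid : List (List String)) (N M i : Int) (zs : List (List (Option Int)))
    (s : Int) : pvBFSLoop grid N M i zs s [] = (zs, s) := by
  rw [pvBFSLoop]

theorem pvBFS_mark (grid : List (List String)) (N M i : Int) (zs : List (List (Option Int)))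
    (s : Int) (l c : Int) (rest : List (Int × Int)) (h : pvGet2? zs l c = some none) :
    pvBFSLoop grid N M i zs s ((l, c) :: rest)
      = pvBFSLoop grid N M i (pvSet2 zs l c (some i))
          (s + (if pvCellS grid l c = "*" then 1 else 0))
          ((pvBFSPush grid N M (pvSet2 zs l c (some i)) l c).reverse ++ rest) := by
  rw [pvBFSLoop]; simp [h]

theorem pvBFS_skip (grid : List (List String)) (N M i : Int) (zs : List (List (Option Int)))
    (s : Int) (l c : Int) (rest : List (Int × Int)) (h : ¬ pvGet2? zs l c = some none) :
    pvBFSLoop grid N M i zs s ((l, c) :: rest) = pvBFSLoop grid N M i zs s rest := by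
  rw [pvBFSLoop]; simp [h]

/-- membership in the pushed neighbour list. -/
theorem pvMem_push (grid : List (List String)) (N M : Int) (zs : List (List (Option Int)))
    (l c : Int) (q : Int × Int) (h : q ∈ pvBFSPush grid N M zs l c) :
    pvAdj (l, c) q ∧ pvInb N M q.1 q.2 = true ∧ pvCellS grid q.1 q.2 ≠ "#"
      ∧ pvGet2? zs q.1 q.2 = some none := by
  unfold pvBFSPush at h
  rw [List.mem_filter] at h
  obtain ⟨hmap, hflt⟩ := h
  rw [List.mem_map] at hmap
  obtain ⟨d, hd, rfl⟩ := hmap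
  simp only [Bool.and_eq_true, bne_iff_ne, beq_iff_eq, ne_eq] at hflt
  exact ⟨⟨d, hd, rfl⟩, hflt.1.1, hflt.1.2, hflt.2⟩

/-- the pushed list contains every open unlabelled neighbour. -/
theorem pvMem_push_intro (grid : List (List String)) (N M : Int)
    (zs : List (List (Option Int))) (l c : Int) (q : Int × Int)
    (hadj : pvAdj (l, c) q) (h1 : pvInb N M q.1 q.2 = true)
    (h2 : pvCellS grid q.1 q.2 ≠ "#") (h3 : pvGet2? zs q.1 q.2 = some none) :
    q ∈ pvBFSPush grid N M zs l c := by
  unfold pvBFSPush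
  rw [List.mem_filter]
  obtain ⟨d, hd, rfl⟩ := hadj
  exact ⟨List.mem_map_of_mem hd, by simp [h1, h2, h3]⟩

/-- inb gives nonnegative coordinates. -/
theorem pvInb_nonneg (N M l c : Int) (h : pvInb N M l c = true) :
    0 ≤ l ∧ l < N ∧ 0 ≤ c ∧ c < M := by
  simp [pvInb] at h
  exact ⟨h.1.1.1, h.1.1.2, h.1.2, h.2⟩

-- ----- the main induction for A's loop: shape, monotonicity, star balance, queue marking -----

theorem pvBFS_main (grid : List (List String)) (N M i : Int) :
    ∀ mu : Nat, ∀ (zs : List (List (Option Int))) (s : Int) (queue : List (Int × Int)),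
      5 * pvNoneCount zs + queue.length ≤ mu →
      (∀ q ∈ queue, pvInb N M q.1 q.2 = true) →
      (pvShape zs N M → pvShape (pvBFSLoop grid N M i zs s queue).1 N M) ∧
      (∀ l c : Int, 0 ≤ l → 0 ≤ c →
        pvGet2? (pvBFSLoop grid N M i zs s queue).1 l c = pvGet2? zs l c ∨
        (pvGet2? zs l c = some none ∧
         pvGet2? (pvBFSLoop grid N M i zs s queue).1 l c = some (some i))) ∧
      ((pvBFSLoop grid N M i zs s queue).2 + (pvStarI grid i zs 0 : Int)
        = s + (pvStarI grid i (pvBFSLoop grid N M i zs s queue).1 0 : Int)) ∧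
      (∀ q ∈ queue, pvGet2? (pvBFSLoop grid N M i zs s queue).1 q.1 q.2 ≠ some none) := by
  intro mu
  induction mu with
  | zero =>
    intro zs s queue hmu hq
    cases queue with
    | nil => rw [pvBFS_nil]; exact ⟨fun h => h, fun _ _ _ _ => Or.inl rfl, by ring, by simp⟩
    | cons hd tl => simp only [List.length_cons] at hmu; omega
  | succ mu ih =>
    intro zs s queue hmu hq
    cases queue with
    | nil => rw [pvBFS_nil]; exact ⟨fun h => h, fun _ _ _ _ => Or.inl rfl, by ring, by simp⟩
    | cons hd tl =>
      obtain ⟨l, c⟩ := hd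
      have hinb := hq (l, c) (List.mem_cons_self ..)
      have hlc := pvInb_nonneg N M l c hinb
      by_cases h2 : pvGet2? zs l c = some none
      · rw [pvBFS_mark grid N M i zs s l c tl h2]
        set zs' := pvSet2 zs l c (some i) with hzs'
        have hget' := pvGet2_set2 zs l c (some i) h2 hlc.1 hlc.2.2.1
        have hq' : ∀ q ∈ (pvBFSPush grid N M zs' l c).reverse ++ tl, pvInb N M q.1 q.2 = true := by
          intro q hmem
          rcases List.mem_append.mp hmem with hmem | hmem
          · exact (pvMem_push grid N M zs' l c q (List.mem_reverse.mp hmem)).2.1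
          · exact hq q (List.mem_cons_of_mem _ hmem)
        have hmu' : 5 * pvNoneCount zs' + ((pvBFSPush grid N M zs' l c).reverse ++ tl).length ≤ mu := by
          have hdec := pvNoneCount_set2 zs l c i h2
          rw [← hzs'] at hdec
          have hlen := pvBFSPush_len_le grid N M zs' l c
          simp only [List.length_append, List.length_reverse, List.length_cons] at hmu ⊢
          omega
        obtain ⟨ihsh, ihmono, ihbal, ihmk⟩ := ih zs' (s + (if pvCellS grid l c = "*" then 1 else 0))
          ((pvBFSPush grid N M zs' l c).reverse ++ tl) hmu' hq'
        refine ⟨?_, ?_, ?_, ?_⟩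
        · intro hsh
          exact ihsh (pvShape_set2 N M zs l c (some i) hsh)
        · intro l' c' hl' hc'
          rcases ihmono l' c' hl' hc' with hm | hm
          · rw [hm, hget' l' c' hl' hc']
            by_cases heq : l' = l ∧ c' = c
            · rw [if_pos heq]
              exact Or.inr ⟨heq.1 ▸ heq.2 ▸ h2, rfl⟩
            · rw [if_neg heq]; exact Or.inl rfl
          · obtain ⟨hm1, hm2⟩ := hm
            rw [hget' l' c' hl' hc'] at hm1
            by_cases heq : l' = l ∧ c' = c
            · rw [if_pos heq] at hm1; simp at hm1
            · rw [if_neg heq] at hm1; exact Or.inr ⟨hm1, hm2⟩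
        · have hstar := pvStarI_set2 grid i zs l c h2 hlc.1 hlc.2.2.1
          rw [← hzs'] at hstar
          omega
        · intro q hmem
          rcases List.mem_cons.mp hmem with heq | hmem
          · rw [heq]
            show pvGet2? _ l c ≠ some none
            rcases ihmono l c hlc.1 hlc.2.2.1 with hm | hm
            · rw [hm, hget' l c hlc.1 hlc.2.2.1, if_pos ⟨rfl, rfl⟩]
              simp
            · rw [hm.2]; simp
          · exact ihmk q (List.mem_append.mpr (Or.inr hmem))
      · rw [pvBFS_skip grid N M i zs s l c tl h2]
        have hmu' : 5 * pvNoneCount zs + tl.length ≤ mu := by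
          simp only [List.length_cons] at hmu; omega
        obtain ⟨ihsh, ihmono, ihbal, ihmk⟩ := ih zs s tl hmu'
          (fun q hmem => hq q (List.mem_cons_of_mem _ hmem))
        refine ⟨ihsh, ihmono, ihbal, ?_⟩
        intro q hmem
        rcases List.mem_cons.mp hmem with heq | hmem
        · rw [heq]
          show pvGet2? _ l c ≠ some none
          rcases ihmono l c hlc.1 hlc.2.2.1 with hm | hm
          · rw [hm]; exact h2
          · rw [hm.2]; simp
        · exact ihmk q hmem

/-- reachable cells are open. -/
theorem pvReach_open (grid : List (List String)) (N M : Int) (zs : List (List (Option Int)))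
    (s p : Int × Int) (h : pvReach grid N M zs s p) : pvOpen grid N M zs p := by
  cases h with
  | base h => exact h
  | step p q _ _ h => exact h

-- ----- closure: after A's loop every labelled cell has no open unlabelled neighbour -----

theorem pvBFS_closed (grid : List (List String)) (N M i : Int) :
    ∀ mu : Nat, ∀ (zs : List (List (Option Int))) (s : Int) (queue : List (Int × Int)),
      5 * pvNoneCount zs + queue.length ≤ mu →
      (∀ q ∈ queue, pvInb N M q.1 q.2 = true) →
      (∀ p q : Int × Int, pvInb N M p.1 p.2 = true →
        (∃ v : Int, pvGet2? zs p.1 p.2 = some (some v)) → pvAdj p q →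
        pvOpen grid N M zs q → q ∈ queue) →
      pvClosed grid N M (pvBFSLoop grid N M i zs s queue).1 := by
  intro mu
  induction mu with
  | zero =>
    intro zs s queue hmu hq hcl
    cases queue with
    | nil =>
      rw [pvBFS_nil]
      intro p q hp hv hadj hopen
      simpa using hcl p q hp hv hadj hopen
    | cons hd tl => simp only [List.length_cons] at hmu; omega
  | succ mu ih =>
    intro zs s queue hmu hq hcl
    cases queue with
    | nil =>
      rw [pvBFS_nil]
      intro p q hp hv hadj hopen
      simpa using hcl p q hp hv hadj hopen
    | cons hd tl =>
      obtain ⟨l, c⟩ := hd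
      have hinb := hq (l, c) (List.mem_cons_self ..)
      have hlc := pvInb_nonneg N M l c hinb
      by_cases h2 : pvGet2? zs l c = some none
      · rw [pvBFS_mark grid N M i zs s l c tl h2]
        set zs' := pvSet2 zs l c (some i) with hzs'
        have hget' := pvGet2_set2 zs l c (some i) h2 hlc.1 hlc.2.2.1
        rw [← hzs'] at hget'
        have hq' : ∀ q ∈ (pvBFSPush grid N M zs' l c).reverse ++ tl, pvInb N M q.1 q.2 = true := by
          intro q hmem
          rcases List.mem_append.mp hmem with hmem | hmem
          · exact (pvMem_push grid N M zs' l c q (List.mem_reverse.mp hmem)).2.1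
          · exact hq q (List.mem_cons_of_mem _ hmem)
        have hmu' : 5 * pvNoneCount zs' + ((pvBFSPush grid N M zs' l c).reverse ++ tl).length ≤ mu := by
          have hdec := pvNoneCount_set2 zs l c i h2
          rw [← hzs'] at hdec
          have hlen := pvBFSPush_len_le grid N M zs' l c
          simp only [List.length_append, List.length_reverse, List.length_cons] at hmu ⊢
          omega
        apply ih zs' _ _ hmu' hq'
        intro p q hp hv hadj hopen
        have hqnn := pvInb_nonneg N M q.1 q.2 hopen.1
        have hqneq : ¬(q.1 = l ∧ q.2 = c) := by
          intro heq
          have hz := hopen.2.2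
          rw [hget' q.1 q.2 hqnn.1 hqnn.2.2.1, if_pos heq] at hz
          simp at hz
        have hopen0 : pvOpen grid N M zs q := by
          refine ⟨hopen.1, hopen.2.1, ?_⟩
          have hz := hopen.2.2
          rw [hget' q.1 q.2 hqnn.1 hqnn.2.2.1, if_neg hqneq] at hz
          exact hz
        by_cases hpeq : p.1 = l ∧ p.2 = c
        · apply List.mem_append.mpr (Or.inl (List.mem_reverse.mpr ?_))
          apply pvMem_push_intro grid N M zs' l c q ?_ hopen.1 hopen.2.1 hopen.2.2
          obtain ⟨d, hd, heq⟩ := hadj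
          exact ⟨d, hd, by rw [heq, hpeq.1, hpeq.2]⟩
        · have hpnn := pvInb_nonneg N M p.1 p.2 hp
          obtain ⟨v, hv⟩ := hv
          rw [hget' p.1 p.2 hpnn.1 hpnn.2.2.1, if_neg hpeq] at hv
          have hmem := hcl p q hp ⟨v, hv⟩ hadj hopen0
          rcases List.mem_cons.mp hmem with heq | hmem
          · exact absurd ⟨by rw [heq], by rw [heq]⟩ hqneq
          · exact List.mem_append.mpr (Or.inr hmem)
      · rw [pvBFS_skip grid N M i zs s l c tl h2]
        have hmu' : 5 * pvNoneCount zs + tl.length ≤ mu := by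
          simp only [List.length_cons] at hmu; omega
        apply ih zs s tl hmu' (fun q hmem => hq q (List.mem_cons_of_mem _ hmem))
        intro p q hp hv hadj hopen
        have hmem := hcl p q hp hv hadj hopen
        rcases List.mem_cons.mp hmem with heq | hmem
        · exfalso
          have hz := hopen.2.2
          rw [heq] at hz
          exact h2 hz
        · exact hmem

-- ----- soundness: every cell A's loop labels is reachable from the seed -----

theorem pvBFS_sound (grid : List (List String)) (N M i : Int)
    (zs0 : List (List (Option Int))) (seed : Int × Int) :
    ∀ mu : Nat, ∀ (zs : List (List (Option Int))) (s : Int) (queue : List (Int × Int)),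
      5 * pvNoneCount zs + queue.length ≤ mu →
      (∀ q ∈ queue, pvInb N M q.1 q.2 = true) →
      (∀ q ∈ queue, pvCellS grid q.1 q.2 ≠ "#") →
      (∀ q ∈ queue, pvGet2? zs0 q.1 q.2 = some none → pvReach grid N M zs0 seed q) →
      (∀ l c : Int, 0 ≤ l → 0 ≤ c → pvGet2? zs l c = some none → pvGet2? zs0 l c = some none) →
      (∀ l c : Int, 0 ≤ l → 0 ≤ c → pvGet2? zs0 l c = some none →
        pvGet2? zs l c ≠ some none → pvReach grid N M zs0 seed (l, c)) →
      ∀ l c : Int, 0 ≤ l → 0 ≤ c → pvGet2? zs0 l c = some none →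
        pvGet2? (pvBFSLoop grid N M i zs s queue).1 l c ≠ some none →
        pvReach grid N M zs0 seed (l, c) := by
  intro mu
  induction mu with
  | zero =>
    intro zs s queue hmu hq hqh hqr hm0 hnew
    cases queue with
    | nil => rw [pvBFS_nil]; exact hnew
    | cons hd tl => simp only [List.length_cons] at hmu; omega
  | succ mu ih =>
    intro zs s queue hmu hq hqh hqr hm0 hnew
    cases queue with
    | nil => rw [pvBFS_nil]; exact hnew
    | cons hd tl =>
      obtain ⟨l, c⟩ := hd
      have hinb := hq (l, c) (List.mem_cons_self ..)
      have hlc := pvInb_nonneg N M l c hinb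
      by_cases h2 : pvGet2? zs l c = some none
      · rw [pvBFS_mark grid N M i zs s l c tl h2]
        set zs' := pvSet2 zs l c (some i) with hzs'
        have hget' := pvGet2_set2 zs l c (some i) h2 hlc.1 hlc.2.2.1
        rw [← hzs'] at hget'
        have hreach_lc : pvReach grid N M zs0 seed (l, c) :=
          hqr (l, c) (List.mem_cons_self ..) (hm0 l c hlc.1 hlc.2.2.1 h2)
        have hq' : ∀ q ∈ (pvBFSPush grid N M zs' l c).reverse ++ tl, pvInb N M q.1 q.2 = true := by
          intro q hmem
          rcases List.mem_append.mp hmem with hmem | hmem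
          · exact (pvMem_push grid N M zs' l c q (List.mem_reverse.mp hmem)).2.1
          · exact hq q (List.mem_cons_of_mem _ hmem)
        have hqh' : ∀ q ∈ (pvBFSPush grid N M zs' l c).reverse ++ tl, pvCellS grid q.1 q.2 ≠ "#" := by
          intro q hmem
          rcases List.mem_append.mp hmem with hmem | hmem
          · exact (pvMem_push grid N M zs' l c q (List.mem_reverse.mp hmem)).2.2.1
          · exact hqh q (List.mem_cons_of_mem _ hmem)
        have hmu' : 5 * pvNoneCount zs' + ((pvBFSPush grid N M zs' l c).reverse ++ tl).length ≤ mu := by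
          have hdec := pvNoneCount_set2 zs l c i h2
          rw [← hzs'] at hdec
          have hlen := pvBFSPush_len_le grid N M zs' l c
          simp only [List.length_append, List.length_reverse, List.length_cons] at hmu ⊢
          omega
        apply ih zs' _ _ hmu' hq' hqh'
        · intro q hmem hq0
          rcases List.mem_append.mp hmem with hmem | hmem
          · obtain ⟨hadj, hqi, hqh2, _⟩ := pvMem_push grid N M zs' l c q (List.mem_reverse.mp hmem)
            exact pvReach.step (l, c) q hreach_lc hadj ⟨hqi, hqh2, hq0⟩
          · exact hqr q (List.mem_cons_of_mem _ hmem) hq0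
        · intro l' c' hl' hc' hz
          rw [hget' l' c' hl' hc'] at hz
          by_cases heq : l' = l ∧ c' = c
          · rw [if_pos heq] at hz; simp at hz
          · rw [if_neg heq] at hz; exact hm0 l' c' hl' hc' hz
        · intro l' c' hl' hc' h0 hz
          rw [hget' l' c' hl' hc'] at hz
          by_cases heq : l' = l ∧ c' = c
          · rw [heq.1, heq.2]; exact hreach_lc
          · rw [if_neg heq] at hz; exact hnew l' c' hl' hc' h0 hz
      · rw [pvBFS_skip grid N M i zs s l c tl h2]
        have hmu' : 5 * pvNoneCount zs + tl.length ≤ mu := by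
          simp only [List.length_cons] at hmu; omega
        exact ih zs s tl hmu' (fun q hmem => hq q (List.mem_cons_of_mem _ hmem))
          (fun q hmem => hqh q (List.mem_cons_of_mem _ hmem))
          (fun q hmem => hqr q (List.mem_cons_of_mem _ hmem)) hm0 hnew

-- ----- the characterisation of one whole fill of A -----

theorem pvFillA_char (grid : List (List String)) (N M i sl sc : Int)
    (zs : List (List (Option Int)))
    (hsh : pvShape zs N M) (hcl : pvClosed grid N M zs)
    (hinb : pvInb N M sl sc = true) (hne : pvCellS grid sl sc ≠ "#")
    (hnone : pvGet2? zs sl sc = some none) :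
    pvShape (pvBFSLoop grid N M i zs 0 [(sl, sc)]).1 N M ∧
    (∀ p : Int × Int, pvReach grid N M zs (sl, sc) p →
      pvGet2? (pvBFSLoop grid N M i zs 0 [(sl, sc)]).1 p.1 p.2 = some (some i)) ∧
    (∀ l c : Int, 0 ≤ l → 0 ≤ c → ¬ pvReach grid N M zs (sl, sc) (l, c) →
      pvGet2? (pvBFSLoop grid N M i zs 0 [(sl, sc)]).1 l c = pvGet2? zs l c) ∧
    ((pvBFSLoop grid N M i zs 0 [(sl, sc)]).2 + (pvStarI grid i zs 0 : Int)
      = (pvStarI grid i (pvBFSLoop grid N M i zs 0 [(sl, sc)]).1 0 : Int)) := by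
  have hq0 : ∀ q ∈ [((sl : Int), (sc : Int))], pvInb N M q.1 q.2 = true := by
    intro q hq; simp at hq; rw [hq]; exact hinb
  obtain ⟨hmsh, hmono, hbal, hmk⟩ := pvBFS_main grid N M i
    (5 * pvNoneCount zs + 1) zs 0 [(sl, sc)] (by simp) hq0
  have hclosed := pvBFS_closed grid N M i (5 * pvNoneCount zs + 1) zs 0 [(sl, sc)] (by simp) hq0
    (by
      intro p q hp hv hadj hopen
      exact absurd hopen (hcl p q hp hv hadj))
  have hsound := pvBFS_sound grid N M i zs (sl, sc) (5 * pvNoneCount zs + 1) zs 0 [(sl, sc)]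
    (by simp) hq0
    (by intro q hq; simp at hq; rw [hq]; exact hne)
    (by
      intro q hq h0; simp at hq; rw [hq]
      exact pvReach.base ⟨hinb, hne, hnone⟩)
    (fun _ _ _ _ h => h)
    (fun _ _ _ _ h h' => absurd h h')
  have hslc := pvInb_nonneg N M sl sc hinb
  refine ⟨hmsh hsh, ?_, ?_, by omega⟩
  · intro p hp
    induction hp with
    | base hopen =>
      have hne' := hmk (sl, sc) (List.mem_cons_self ..)
      rcases hmono sl sc hslc.1 hslc.2.2.1 with hm | hm
      · exact absurd (hm.trans hnone) hne'
      · exact hm.2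
    | step p q hp hadj hopen ihp =>
      have hqnn := pvInb_nonneg N M q.1 q.2 hopen.1
      by_cases hqm : pvGet2? (pvBFSLoop grid N M i zs 0 [(sl, sc)]).1 q.1 q.2 = some none
      · exfalso
        have hpo := pvReach_open grid N M zs (sl, sc) p hp
        exact hclosed p q hpo.1 ⟨i, ihp⟩ hadj ⟨hopen.1, hopen.2.1, hqm⟩
      · rcases hmono q.1 q.2 hqnn.1 hqnn.2.2.1 with hm | hm
        · exact absurd (hm.trans hopen.2.2) hqm
        · exact hm.2
  · intro l c hl hc hnr
    rcases hmono l c hl hc with hm | hm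
    · exact hm
    · exact absurd (hsound l c hl hc hm.1 (by rw [hm.2]; simp)) hnr

-- ----- adjacency utilities -----

theorem pvAdj_of (pl pc ql qc : Int)
    (h : (ql = pl - 1 ∧ qc = pc) ∨ (ql = pl + 1 ∧ qc = pc) ∨
         (ql = pl ∧ qc = pc - 1) ∨ (ql = pl ∧ qc = pc + 1)) :
    pvAdj (pl, pc) (ql, qc) := by
  rcases h with ⟨h1, h2⟩ | ⟨h1, h2⟩ | ⟨h1, h2⟩ | ⟨h1, h2⟩
  · refine ⟨(-1, 0), by simp [pvDirs4], ?_⟩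
    rw [Prod.ext_iff]; constructor <;> dsimp only <;> omega
  · refine ⟨(1, 0), by simp [pvDirs4], ?_⟩
    rw [Prod.ext_iff]; constructor <;> dsimp only <;> omega
  · refine ⟨(0, -1), by simp [pvDirs4], ?_⟩
    rw [Prod.ext_iff]; constructor <;> dsimp only <;> omega
  · refine ⟨(0, 1), by simp [pvDirs4], ?_⟩
    rw [Prod.ext_iff]; constructor <;> dsimp only <;> omega

theorem pvAdj_elim (p q : Int × Int) (h : pvAdj p q) :
    (q.1 = p.1 - 1 ∧ q.2 = p.2) ∨ (q.1 = p.1 + 1 ∧ q.2 = p.2) ∨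
    (q.1 = p.1 ∧ q.2 = p.2 - 1) ∨ (q.1 = p.1 ∧ q.2 = p.2 + 1) := by
  obtain ⟨d, hd, heq⟩ := h
  subst heq
  simp only [pvDirs4, List.mem_cons, List.not_mem_nil, or_false] at hd
  rcases hd with rfl | rfl | rfl | rfl
  · refine Or.inl ⟨?_, ?_⟩ <;> dsimp only <;> omega
  · refine Or.inr (Or.inl ⟨?_, ?_⟩) <;> dsimp only <;> omega
  · refine Or.inr (Or.inr (Or.inl ⟨?_, ?_⟩)) <;> dsimp only <;> omega
  · refine Or.inr (Or.inr (Or.inr ⟨?_, ?_⟩)) <;> dsimp only <;> omega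

-- ----- the sweep invariant of B -----

/-- invariant of B's propagation (zs0 = the matrix before the seed was marked). -/
def pvSInv (grid : List (List String)) (N M : Int) (zs0 : List (List (Option Int)))
    (seed : Int × Int) (i : Int) (st : List (List (Option Int)) × Int × Bool) : Prop :=
  pvShape st.1 N M ∧
  (∀ l c : Int, 0 ≤ l → 0 ≤ c →
    pvGet2? st.1 l c = pvGet2? zs0 l c ∨
    (pvGet2? zs0 l c = some none ∧ pvGet2? st.1 l c = some (some i))) ∧
  (∀ l c : Int, 0 ≤ l → 0 ≤ c → pvGet2? st.1 l c = some (some i) →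
    pvReach grid N M zs0 seed (l, c)) ∧
  (st.2.1 + (pvStarI grid i zs0 0 : Int) = (pvStarI grid i st.1 0 : Int)) ∧
  pvGet2? st.1 seed.1 seed.2 = some (some i)

theorem pvFoldImp {α St : Type} (P : St → Prop) (f : St → α → St) :
    ∀ (L : List α), (∀ st a, a ∈ L → P st → P (f st a)) → ∀ st : St, P st → P (L.foldl f st) := by
  intro L
  induction L with
  | nil => intro _ st h; exact h
  | cons a L ih =>
    intro h st hst
    exact ih (fun st' b hb => h st' b (List.mem_cons_of_mem _ hb)) (f st a)
      (h st a (List.mem_cons_self ..) hst)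

theorem pvStep_SInv (grid : List (List String)) (N M : Int) (zs0 : List (List (Option Int)))
    (seed : Int × Int) (i : Int) (hseed : 0 ≤ seed.1 ∧ 0 ≤ seed.2)
    (st : List (List (Option Int)) × Int × Bool) (l c : Int)
    (hl : 0 ≤ l ∧ l < N) (hc : 0 ≤ c ∧ c < M)
    (h : pvSInv grid N M zs0 seed i st) :
    pvSInv grid N M zs0 seed i (pvStep grid N M i st l c) := by
  obtain ⟨hsh, hmono, hsound, hbal, hsd⟩ := h
  unfold pvStep
  split
  case isFalse => exact ⟨hsh, hmono, hsound, hbal, hsd⟩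
  case isTrue hcond =>
  obtain ⟨hz, hhash, hnbr⟩ := hcond
  have hz0 : pvGet2? zs0 l c = some none := by
    rcases hmono l c hl.1 hc.1 with hm | hm
    · rw [← hm]; exact hz
    · rw [hm.2] at hz; simp at hz
  have hget' := pvGet2_set2 st.1 l c (some i) hz hl.1 hc.1
  have hinb : pvInb N M l c = true := by simp [pvInb]; omega
  have hreach : pvReach grid N M zs0 seed (l, c) := by
    simp only [pvNbrI, Bool.or_eq_true, Bool.and_eq_true, decide_eq_true_eq, beq_iff_eq] at hnbr
    rcases hnbr with ((⟨h0, hg⟩ | ⟨h0, hg⟩) | ⟨h0, hg⟩) | ⟨h0, hg⟩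
    · exact pvReach.step (l - 1, c) (l, c) (hsound (l - 1) c (by omega) hc.1 hg)
        (pvAdj_of _ _ _ _ (Or.inr (Or.inl ⟨by omega, rfl⟩))) ⟨hinb, hhash, hz0⟩
    · exact pvReach.step (l + 1, c) (l, c) (hsound (l + 1) c (by omega) hc.1 hg)
        (pvAdj_of _ _ _ _ (Or.inl ⟨by omega, rfl⟩)) ⟨hinb, hhash, hz0⟩
    · exact pvReach.step (l, c - 1) (l, c) (hsound l (c - 1) hl.1 (by omega) hg)
        (pvAdj_of _ _ _ _ (Or.inr (Or.inr (Or.inr ⟨rfl, by omega⟩)))) ⟨hinb, hhash, hz0⟩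
    · exact pvReach.step (l, c + 1) (l, c) (hsound l (c + 1) hl.1 (by omega) hg)
        (pvAdj_of _ _ _ _ (Or.inr (Or.inr (Or.inl ⟨rfl, by omega⟩)))) ⟨hinb, hhash, hz0⟩
  refine ⟨pvShape_set2 N M st.1 l c (some i) hsh, ?_, ?_, ?_, ?_⟩
  · intro l' c' hl' hc'
    rw [hget' l' c' hl' hc']
    by_cases heq : l' = l ∧ c' = c
    · rw [if_pos heq]
      exact Or.inr ⟨heq.1 ▸ heq.2 ▸ hz0, rfl⟩
    · rw [if_neg heq]; exact hmono l' c' hl' hc'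
  · intro l' c' hl' hc' hg
    rw [hget' l' c' hl' hc'] at hg
    by_cases heq : l' = l ∧ c' = c
    · rw [heq.1, heq.2]; exact hreach
    · rw [if_neg heq] at hg; exact hsound l' c' hl' hc' hg
  · have hstar := pvStarI_set2 grid i st.1 l c hz hl.1 hc.1
    simp only []
    omega
  · by_cases heq : seed.1 = l ∧ seed.2 = c
    · exfalso
      rw [heq.1, heq.2] at hsd
      rw [hsd] at hz
      simp at hz
    · rw [hget' seed.1 seed.2 hseed.1 hseed.2, if_neg heq]
      exact hsd

theorem pvSweep_SInv (grid : List (List String)) (N M : Int) (zs0 : List (List (Option Int)))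
    (seed : Int × Int) (i : Int) (hseed : 0 ≤ seed.1 ∧ 0 ≤ seed.2)
    (st : List (List (Option Int)) × Int × Bool)
    (h : pvSInv grid N M zs0 seed i st) :
    pvSInv grid N M zs0 seed i (pvSweep grid N M i st) := by
  unfold pvSweep
  refine pvFoldImp (pvSInv grid N M zs0 seed i) _ _ ?_ st h
  intro st' l hlmem hst'
  have hl := PySem.List.mem_pyRange_one.mp hlmem
  refine pvFoldImp (pvSInv grid N M zs0 seed i) _ _ ?_ st' hst'
  intro st'' c hcmem hh
  have hc := PySem.List.mem_pyRange_one.mp hcmem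
  exact pvStep_SInv grid N M zs0 seed i hseed st'' l c (by omega) (by omega) hh

-- ----- a sweep that reports no change found no candidate cell -----

theorem pvRowFold_sticky (grid : List (List String)) (N M i l : Int)
    (L : List Int) (st : List (List (Option Int)) × Int × Bool) (h : st.2.2 = true) :
    (L.foldl (fun st c => pvStep grid N M i st l c) st).2.2 = true := by
  refine pvFoldImp (fun x => x.2.2 = true) _ _ ?_ st h
  intro st' c _ hh
  unfold pvStep
  split
  · rfl
  · exact hh

theorem pvRow_false (grid : List (List String)) (N M i l : Int) :
    ∀ (L : List Int) (zs : List (List (Option Int))) (cnt : Int),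
      (L.foldl (fun st c => pvStep grid N M i st l c) (zs, cnt, false)).2.2 = false →
      (∀ c ∈ L, ¬(pvGet2? zs l c = some none ∧ pvCellS grid l c ≠ "#"
          ∧ pvNbrI zs N M i l c = true)) ∧
      L.foldl (fun st c => pvStep grid N M i st l c) (zs, cnt, false) = (zs, cnt, false) := by
  intro L
  induction L with
  | nil => intro zs cnt _; exact ⟨by simp, rfl⟩
  | cons a L ih =>
    intro zs cnt hfin
    rw [List.foldl_cons] at hfin ⊢
    by_cases hcond : pvGet2? zs l a = some none ∧ pvCellS grid l a ≠ "#"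
        ∧ pvNbrI zs N M i l a = true
    · exfalso
      have hstep : (pvStep grid N M i (zs, cnt, false) l a).2.2 = true := by
        unfold pvStep; rw [if_pos hcond]
      rw [pvRowFold_sticky grid N M i l L _ hstep] at hfin
      simp at hfin
    · have hstep : pvStep grid N M i (zs, cnt, false) l a = (zs, cnt, false) := by
        unfold pvStep; rw [if_neg hcond]
      rw [hstep] at hfin ⊢
      obtain ⟨hall, heq⟩ := ih zs cnt hfin
      refine ⟨?_, heq⟩
      intro c hc
      rcases List.mem_cons.mp hc with rfl | hc
      · exact hcond
      · exact hall c hc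

theorem pvSweep_false (grid : List (List String)) (N M i : Int) :
    ∀ (L : List Int) (zs : List (List (Option Int))) (cnt : Int),
      (L.foldl (fun st l => (PySem.List.pyRange 0 M 1).foldl
          (fun st c => pvStep grid N M i st l c) st) (zs, cnt, false)).2.2 = false →
      (∀ l ∈ L, ∀ c ∈ PySem.List.pyRange 0 M 1,
        ¬(pvGet2? zs l c = some none ∧ pvCellS grid l c ≠ "#" ∧ pvNbrI zs N M i l c = true)) ∧
      L.foldl (fun st l => (PySem.List.pyRange 0 M 1).foldl
          (fun st c => pvStep grid N M i st l c) st) (zs, cnt, false) = (zs, cnt, false) := by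
  intro L
  induction L with
  | nil => intro zs cnt _; exact ⟨by simp, rfl⟩
  | cons a L ih =>
    intro zs cnt hfin
    rw [List.foldl_cons] at hfin ⊢
    by_cases hrow : ((PySem.List.pyRange 0 M 1).foldl
        (fun st c => pvStep grid N M i st a c) (zs, cnt, false)).2.2 = true
    · exfalso
      have hkeep : (L.foldl (fun st l => (PySem.List.pyRange 0 M 1).foldl
          (fun st c => pvStep grid N M i st l c) st)
          ((PySem.List.pyRange 0 M 1).foldl
            (fun st c => pvStep grid N M i st a c) (zs, cnt, false))).2.2 = true := by
        refine pvFoldImp (fun x : List (List (Option Int)) × Int × Bool => x.2.2 = true) _ _ ?_ _ hrow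
        intro st' l _ hh
        exact pvRowFold_sticky grid N M i l _ st' hh
      rw [hkeep] at hfin
      simp at hfin
    · rw [Bool.not_eq_true] at hrow
      obtain ⟨hall, heq⟩ := pvRow_false grid N M i a (PySem.List.pyRange 0 M 1) zs cnt hrow
      rw [heq] at hfin ⊢
      obtain ⟨hall2, heq2⟩ := ih zs cnt hfin
      refine ⟨?_, heq2⟩
      intro l hl c hc
      rcases List.mem_cons.mp hl with rfl | hl
      · exact hall c hc
      · exact hall2 l hl c hc

-- ----- the while-changed loop of B -----

theorem pvSweepLoop_step (grid : List (List String)) (N M i : Int)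
    (zs : List (List (Option Int))) (cnt : Int)
    (h : (pvSweep grid N M i (zs, cnt, false)).2.2 = true) :
    pvSweepLoop grid N M i zs cnt
      = pvSweepLoop grid N M i (pvSweep grid N M i (zs, cnt, false)).1
          (pvSweep grid N M i (zs, cnt, false)).2.1 := by
  rw [pvSweepLoop]
  simp [h]

theorem pvSweepLoop_done (grid : List (List String)) (N M i : Int)
    (zs : List (List (Option Int))) (cnt : Int)
    (h : ¬ (pvSweep grid N M i (zs, cnt, false)).2.2 = true) :
    pvSweepLoop grid N M i zs cnt
      = ((pvSweep grid N M i (zs, cnt, false)).1, (pvSweep grid N M i (zs, cnt, false)).2.1) := by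
  rw [pvSweepLoop]
  simp [h]

theorem pvSweepLoop_main (grid : List (List String)) (N M : Int)
    (zs0 : List (List (Option Int))) (seed : Int × Int) (i : Int)
    (hseed : 0 ≤ seed.1 ∧ 0 ≤ seed.2) :
    ∀ n : Nat, ∀ (zs : List (List (Option Int))) (cnt : Int), pvNoneCount zs ≤ n →
      pvSInv grid N M zs0 seed i (zs, cnt, false) →
      pvSInv grid N M zs0 seed i
        ((pvSweepLoop grid N M i zs cnt).1, (pvSweepLoop grid N M i zs cnt).2, false) ∧
      (∀ l ∈ PySem.List.pyRange 0 N 1, ∀ c ∈ PySem.List.pyRange 0 M 1,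
        ¬(pvGet2? (pvSweepLoop grid N M i zs cnt).1 l c = some none ∧ pvCellS grid l c ≠ "#"
          ∧ pvNbrI (pvSweepLoop grid N M i zs cnt).1 N M i l c = true)) := by
  intro n
  induction n with
  | zero =>
    intro zs cnt hn hinv
    by_cases hch : (pvSweep grid N M i (zs, cnt, false)).2.2 = true
    · exfalso
      have := pvSweep_changed_lt grid N M i zs cnt hch
      omega
    · rw [pvSweepLoop_done grid N M i zs cnt hch]
      rcases pvSweep_R grid N M i (zs, cnt, false) with hlt | heq
      · exact absurd hlt.2 hch
      · rw [heq]
        refine ⟨hinv, ?_⟩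
        intro l hl c hc
        have hfalse : (pvSweep grid N M i (zs, cnt, false)).2.2 = false := by rw [heq]
        obtain ⟨hall, _⟩ := pvSweep_false grid N M i (PySem.List.pyRange 0 N 1) zs cnt
          (by unfold pvSweep at hfalse; exact hfalse)
        exact hall l hl c hc
  | succ n ih =>
    intro zs cnt hn hinv
    by_cases hch : (pvSweep grid N M i (zs, cnt, false)).2.2 = true
    · rw [pvSweepLoop_step grid N M i zs cnt hch]
      have hsw := pvSweep_SInv grid N M zs0 seed i hseed (zs, cnt, false) hinv
      have hlt := pvSweep_changed_lt grid N M i zs cnt hch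
      exact ih (pvSweep grid N M i (zs, cnt, false)).1 (pvSweep grid N M i (zs, cnt, false)).2.1
        (by omega) hsw
    · rw [pvSweepLoop_done grid N M i zs cnt hch]
      rcases pvSweep_R grid N M i (zs, cnt, false) with hlt | heq
      · exact absurd hlt.2 hch
      · rw [heq]
        refine ⟨hinv, ?_⟩
        intro l hl c hc
        have hfalse : (pvSweep grid N M i (zs, cnt, false)).2.2 = false := by rw [heq]
        obtain ⟨hall, _⟩ := pvSweep_false grid N M i (PySem.List.pyRange 0 N 1) zs cnt
          (by unfold pvSweep at hfalse; exact hfalse)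
        exact hall l hl c hc

-- ----- the characterisation of one whole fill of B -----

theorem pvFillB_char (grid : List (List String)) (N M i sl sc : Int)
    (zs : List (List (Option Int)))
    (hsh : pvShape zs N M) (hbnd : pvBnd zs i)
    (hinb : pvInb N M sl sc = true) (hne : pvCellS grid sl sc ≠ "#")
    (hnone : pvGet2? zs sl sc = some none) :
    pvShape (pvSweepLoop grid N M i (pvSet2 zs sl sc (some i))
        (if pvCellS grid sl sc = "*" then 1 else 0)).1 N M ∧
    (∀ p : Int × Int, pvReach grid N M zs (sl, sc) p →
      pvGet2? (pvSweepLoop grid N M i (pvSet2 zs sl sc (some i))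
        (if pvCellS grid sl sc = "*" then 1 else 0)).1 p.1 p.2 = some (some i)) ∧
    (∀ l c : Int, 0 ≤ l → 0 ≤ c → ¬ pvReach grid N M zs (sl, sc) (l, c) →
      pvGet2? (pvSweepLoop grid N M i (pvSet2 zs sl sc (some i))
        (if pvCellS grid sl sc = "*" then 1 else 0)).1 l c = pvGet2? zs l c) ∧
    ((pvSweepLoop grid N M i (pvSet2 zs sl sc (some i))
        (if pvCellS grid sl sc = "*" then 1 else 0)).2 + (pvStarI grid i zs 0 : Int)
      = (pvStarI grid i (pvSweepLoop grid N M i (pvSet2 zs sl sc (some i))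
        (if pvCellS grid sl sc = "*" then 1 else 0)).1 0 : Int)) := by
  have hslc := pvInb_nonneg N M sl sc hinb
  have hget' := pvGet2_set2 zs sl sc (some i) hnone hslc.1 hslc.2.2.1
  have hinv1 : pvSInv grid N M zs (sl, sc) i
      (pvSet2 zs sl sc (some i), (if pvCellS grid sl sc = "*" then 1 else 0), false) := by
    refine ⟨pvShape_set2 N M zs sl sc (some i) hsh, ?_, ?_, ?_, ?_⟩
    · intro l c hl hc
      rw [hget' l c hl hc]
      by_cases heq : l = sl ∧ c = sc
      · rw [if_pos heq]
        exact Or.inr ⟨heq.1 ▸ heq.2 ▸ hnone, rfl⟩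
      · rw [if_neg heq]; exact Or.inl rfl
    · intro l c hl hc hg
      rw [hget' l c hl hc] at hg
      by_cases heq : l = sl ∧ c = sc
      · rw [heq.1, heq.2]
        exact pvReach.base ⟨hinb, hne, hnone⟩
      · rw [if_neg heq] at hg
        exfalso
        have := hbnd l c hl hc i hg
        omega
    · have hstar := pvStarI_set2 grid i zs sl sc hnone hslc.1 hslc.2.2.1
      simp only []
      omega
    · exact by rw [hget' sl sc hslc.1 hslc.2.2.1, if_pos ⟨rfl, rfl⟩]
  obtain ⟨hinvf, hfix⟩ := pvSweepLoop_main grid N M zs (sl, sc) i ⟨hslc.1, hslc.2.2.1⟩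
    (pvNoneCount (pvSet2 zs sl sc (some i))) (pvSet2 zs sl sc (some i))
    (if pvCellS grid sl sc = "*" then 1 else 0) le_rfl hinv1
  obtain ⟨hshf, hmonof, hsoundf, hbalf, hsdf⟩ := hinvf
  refine ⟨hshf, ?_, ?_, hbalf⟩
  · intro p hp
    induction hp with
    | base hopen => exact hsdf
    | step p q hp hadj hopen ihp =>
      have hqnn := pvInb_nonneg N M q.1 q.2 hopen.1
      by_cases hqm : pvGet2? (pvSweepLoop grid N M i (pvSet2 zs sl sc (some i))
          (if pvCellS grid sl sc = "*" then 1 else 0)).1 q.1 q.2 = some none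
      · exfalso
        have hpo := pvReach_open grid N M zs (sl, sc) p hp
        have hpnn := pvInb_nonneg N M p.1 p.2 hpo.1
        apply hfix q.1 (PySem.List.mem_pyRange_one.mpr ⟨hqnn.1, hqnn.2.1⟩)
          q.2 (PySem.List.mem_pyRange_one.mpr ⟨hqnn.2.2.1, hqnn.2.2.2⟩)
        refine ⟨hqm, hopen.2.1, ?_⟩
        simp only [pvNbrI, Bool.or_eq_true, Bool.and_eq_true, decide_eq_true_eq, beq_iff_eq]
        rcases pvAdj_elim p q hadj with ⟨e1, e2⟩ | ⟨e1, e2⟩ | ⟨e1, e2⟩ | ⟨e1, e2⟩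
        · exact Or.inl (Or.inl (Or.inr ⟨by omega,
            by rw [show q.1 + 1 = p.1 by omega, e2]; exact ihp⟩))
        · exact Or.inl (Or.inl (Or.inl ⟨by omega,
            by rw [show q.1 - 1 = p.1 by omega, e2]; exact ihp⟩))
        · exact Or.inr ⟨by omega,
            by rw [e1, show q.2 + 1 = p.2 by omega]; exact ihp⟩
        · exact Or.inl (Or.inr ⟨by omega,
            by rw [e1, show q.2 - 1 = p.2 by omega]; exact ihp⟩)
      · rcases hmonof q.1 q.2 hqnn.1 hqnn.2.2.1 with hm | hm
        · exact absurd (hm.trans hopen.2.2) hqm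
        · exact hm.2
  · intro l c hl hc hnr
    rcases hmonof l c hl hc with hm | hm
    · exact hm
    · exact absurd (hsoundf l c hl hc hm.2) hnr

-- ----- one fill of A equals one fill of B (and the outer invariant is preserved) -----

theorem pvFill_eq (grid : List (List String)) (N M i sl sc : Int)
    (zs : List (List (Option Int)))
    (hsh : pvShape zs N M) (hbnd : pvBnd zs i) (hcl : pvClosed grid N M zs) (hi : 0 ≤ i)
    (hinb : pvInb N M sl sc = true) (hne : pvCellS grid sl sc ≠ "#")
    (hnone : pvGet2? zs sl sc = some none) :
    pvBFSLoop grid N M i zs 0 [(sl, sc)]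
      = pvSweepLoop grid N M i (pvSet2 zs sl sc (some i))
          (if pvCellS grid sl sc = "*" then 1 else 0) ∧
    pvShape (pvBFSLoop grid N M i zs 0 [(sl, sc)]).1 N M ∧
    pvBnd (pvBFSLoop grid N M i zs 0 [(sl, sc)]).1 (i + 1) ∧
    pvClosed grid N M (pvBFSLoop grid N M i zs 0 [(sl, sc)]).1 := by
  obtain ⟨hAsh, hAmk, hAun, hAbal⟩ := pvFillA_char grid N M i sl sc zs hsh hcl hinb hne hnone
  obtain ⟨hBsh, hBmk, hBun, hBbal⟩ := pvFillB_char grid N M i sl sc zs hsh hbnd hinb hne hnone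
  have hzeq : (pvBFSLoop grid N M i zs 0 [(sl, sc)]).1
      = (pvSweepLoop grid N M i (pvSet2 zs sl sc (some i))
          (if pvCellS grid sl sc = "*" then 1 else 0)).1 := by
    apply pvMatrixExt N M _ _ hAsh hBsh
    intro l c hl hc
    by_cases hr : pvReach grid N M zs (sl, sc) (l, c)
    · rw [hAmk (l, c) hr, hBmk (l, c) hr]
    · rw [hAun l c hl hc hr, hBun l c hl hc hr]
  have hmain : pvBFSLoop grid N M i zs 0 [(sl, sc)]
      = pvSweepLoop grid N M i (pvSet2 zs sl sc (some i))
          (if pvCellS grid sl sc = "*" then 1 else 0) := by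
    have hcnt : (pvBFSLoop grid N M i zs 0 [(sl, sc)]).2
        = (pvSweepLoop grid N M i (pvSet2 zs sl sc (some i))
            (if pvCellS grid sl sc = "*" then 1 else 0)).2 := by
      rw [hzeq] at hAbal
      omega
    exact Prod.ext hzeq hcnt
  refine ⟨hmain, hAsh, ?_, ?_⟩
  · intro l c hl hc v hv
    by_cases hr : pvReach grid N M zs (sl, sc) (l, c)
    · rw [hAmk (l, c) hr] at hv
      simp only [Option.some.injEq] at hv
      omega
    · rw [hAun l c hl hc hr] at hv
      have := hbnd l c hl hc v hv
      omega
  · intro p q hpinb hpv hadj hopenq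
    have hqnn := pvInb_nonneg N M q.1 q.2 hopenq.1
    by_cases hrq : pvReach grid N M zs (sl, sc) q
    · have := hAmk q hrq
      rw [hopenq.2.2] at this
      simp at this
    · have hq0 : pvGet2? zs q.1 q.2 = some none := by
        rw [← hAun q.1 q.2 hqnn.1 hqnn.2.2.1 hrq]
        exact hopenq.2.2
      have hopenq0 : pvOpen grid N M zs q := ⟨hopenq.1, hopenq.2.1, hq0⟩
      by_cases hrp : pvReach grid N M zs (sl, sc) p
      · exact hrq (pvReach.step p q hrp hadj hopenq0)
      · have hpnn := pvInb_nonneg N M p.1 p.2 hpinb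
        obtain ⟨v, hv⟩ := hpv
        rw [hAun p.1 p.2 hpnn.1 hpnn.2.2.1 hrp] at hv
        exact hcl p q hpinb ⟨v, hv⟩ hadj hopenq0

-- ----- the outer row-major scan, with its invariant -----

theorem pvFoldInv {α St : Type} (Inv : St → Prop) (f g : St → α → St) :
    ∀ (L : List α), (∀ st a, a ∈ L → Inv st → f st a = g st a ∧ Inv (f st a)) →
      ∀ st : St, Inv st → L.foldl f st = L.foldl g st ∧ Inv (L.foldl f st) := by
  intro L
  induction L with
  | nil => intro _ st h; exact ⟨rfl, h⟩
  | cons a L ih =>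
    intro h st hst
    obtain ⟨heq, hinv⟩ := h st a (List.mem_cons_self ..) hst
    rw [List.foldl_cons, List.foldl_cons, ← heq]
    exact ih (fun st' b hb => h st' b (List.mem_cons_of_mem _ hb)) (f st a) hinv

theorem pvInit_get (N M : Int) (l c : Int) (w : Option Int)
    (h : pvGet2? (List.replicate N.toNat (List.replicate M.toNat (none : Option Int))) l c
      = some w) : w = none := by
  unfold pvGet2? at h
  cases hrow : PySem.List.pyGet? (List.replicate N.toNat (List.replicate M.toNat (none : Option Int))) l with
  | none => rw [hrow] at h; simp at h
  | some row =>
  rw [hrow] at h; simp only [Option.bind_some] at h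
  have hmem := PySem.List.mem_of_pyGet?_eq_some _ hrow
  have hmem2 := PySem.List.mem_of_pyGet?_eq_some _ h
  rw [List.eq_of_mem_replicate hmem] at hmem2
  exact List.eq_of_mem_replicate hmem2

theorem getzones_eq_alt (grid : List (List String)) (N M : Int) :
    getzones grid N M = getzones_alt grid N M := by
  unfold getzones getzones_alt
  refine (pvFoldInv
    (fun acc : List (List (Option Int)) × List Int =>
      pvShape acc.1 N M ∧ pvBnd acc.1 (acc.2.length : Int) ∧ pvClosed grid N M acc.1)
    _ _ (PySem.List.pyRange 0 N 1) ?_ _ ?_).1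
  · intro acc l hlmem hInv
    have hl := PySem.List.mem_pyRange_one.mp hlmem
    exact pvFoldInv
      (fun acc : List (List (Option Int)) × List Int =>
        pvShape acc.1 N M ∧ pvBnd acc.1 (acc.2.length : Int) ∧ pvClosed grid N M acc.1)
      _ _ (PySem.List.pyRange 0 M 1) (by
        intro acc2 c hcmem hInv2
        have hc := PySem.List.mem_pyRange_one.mp hcmem
        obtain ⟨hsh2, hbnd2, hcl2⟩ := hInv2
        by_cases hcond : pvCellS grid l c ≠ "#" ∧ pvGet2? acc2.1 l c = some none
        · rw [if_pos hcond, if_pos hcond]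
          have hinb : pvInb N M l c = true := by simp [pvInb]; omega
          obtain ⟨heq, hsh', hbnd', hcl'⟩ := pvFill_eq grid N M (acc2.2.length : Int) l c acc2.1
            hsh2 hbnd2 hcl2 (Int.natCast_nonneg _) hinb hcond.1 hcond.2
          refine ⟨?_, ?_, ?_, ?_⟩
          · dsimp only
            rw [heq]
          · exact hsh'
          · dsimp only
            intro l' c' hl' hc' v hv
            have := hbnd' l' c' hl' hc' v hv
            have hlen : ((acc2.2 ++ [(pvBFSLoop grid N M (acc2.2.length : Int) acc2.1 0
                [(l, c)]).2]).length : Int) = (acc2.2.length : Int) + 1 := by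
              rw [List.length_append, List.length_singleton]
              push_cast
              ring
            rw [hlen]
            omega
          · exact hcl'
        · rw [if_neg hcond, if_neg hcond]
          exact ⟨rfl, hsh2, hbnd2, hcl2⟩) acc hInv
  · refine ⟨⟨List.length_replicate, ?_⟩, ?_, ?_⟩
    · intro r hr
      rw [List.eq_of_mem_replicate hr]
      exact List.length_replicate
    · intro l c hl hc v hv
      exact absurd (pvInit_get N M l c _ hv) (by simp)
    · intro p q hpinb hpv hadj hopenq
      obtain ⟨v, hv⟩ := hpv
      exact absurd (pvInit_get N M p.1 p.2 _ hv) (by simp)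

-- ===== VERDICT (by name: the statement is the Claim_ definition above) =====
theorem getzones_spec : Claim_equal_getzones := by
  intro grid N M _ _
  unfold Spec_getzones
  exact getzones_eq_alt grid N M
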